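-- pv_equiv track=rewrite | github.com/ericjanto/ship-backend | WildcardSearch.py | clean_wildcard_term
-- ===== SOURCE A (Python) =====
-- def clean_wildcard_term(query_term):
--     query_term = query_term.lower()
--     if query_term.count("*") > 1:
--         add_wildcard = True
--         cleaned_term = ""
--         for ch in query_term:
--             if ch == "*":
--                 if add_wildcard:
--                     cleaned_term += ch
--                 add_wildcard = False
--             else:
--                 cleaned_term += ch
--
--         query_term = cleaned_term
--
--     return query_term
-- ===== SOURCE B (Python) =====
-- def clean_wildcard_term(query_term):
--     query_term = query_term.lower()
--     i = query_term.find("*")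
--     if i == -1:
--         return query_term
--     return query_term[:i + 1] + query_term[i + 1:].replace("*", "")
-- ===== Notes on version B (the rewrite author's own statement) =====
-- stated objective: simpler
-- what changed: Replaces the flag-carrying character loop (guarded by a full count() pre-pass) with find() for the first asterisk plus slice/replace to strip the rest, eliminating the explicit loop and the boolean flag.
import Mathlib
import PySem

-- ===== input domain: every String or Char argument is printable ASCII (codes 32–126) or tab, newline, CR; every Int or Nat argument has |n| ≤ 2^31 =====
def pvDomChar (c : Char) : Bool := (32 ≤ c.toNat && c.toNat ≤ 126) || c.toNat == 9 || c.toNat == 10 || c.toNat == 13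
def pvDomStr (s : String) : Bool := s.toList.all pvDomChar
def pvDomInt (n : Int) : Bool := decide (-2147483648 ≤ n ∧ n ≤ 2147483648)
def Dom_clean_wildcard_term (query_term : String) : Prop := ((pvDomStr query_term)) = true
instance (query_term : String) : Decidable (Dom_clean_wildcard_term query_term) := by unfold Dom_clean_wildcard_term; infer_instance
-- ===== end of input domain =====

-- B replaces A's flag-carrying character loop (and its count() pre-pass) with
-- find() for the first '*' plus slice/replace to strip later asterisks (objective: simpler).

-- ===== PORT A =====
-- the body of A's for-loop over the characters (state: (add_wildcard, cleaned_term as char list))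
def stepA (st : Bool × List Char) (ch : Char) : Bool × List Char :=
  if ch = '*' then
    (false, if st.1 then st.2 ++ [ch] else st.2)
  else
    (st.1, st.2 ++ [ch])

def clean_wildcard_term (query_term : String) : String :=
  let q := PySem.Str.lower query_term
  if PySem.Str.count q "*" > 1 then
    -- add_wildcard = True; cleaned_term = ""; for ch in query_term: …
    let r := q.toList.foldl stepA (true, [])
    String.ofList r.2    -- query_term = cleaned_term
  else q

-- ===== PORT B =====
def clean_wildcard_term_alt (query_term : String) : String :=
  let q := PySem.Str.lower query_term
  let i := PySem.Str.find q "*"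
  if i = -1 then q
  else
    -- q[:i+1] + q[i+1:].replace("*", "")   (str '+' is exactly code-point list append)
    String.ofList ((PySem.Str.slice q none (some (i + 1))).toList
      ++ (PySem.Str.replace (PySem.Str.slice q (some (i + 1)) none) "*" "").toList)

-- ===== PRECONDITION & SPEC =====
def Spec_clean_wildcard_term (query_term : String) (out : String) : Prop := out = clean_wildcard_term_alt query_term
instance (query_term : String) (out : String) : Decidable (Spec_clean_wildcard_term query_term out) := by unfold Spec_clean_wildcard_term; infer_instance

-- ===== CLAIM (what is proved, stated in full; the proofs are below) =====
def Claim_equal_clean_wildcard_term : Prop := ∀ (query_term : String), Dom_clean_wildcard_term query_term → Spec_clean_wildcard_term query_term (clean_wildcard_term query_term)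

-- ===== LEMMAS AND PROOFS =====

-- count.go with single-char pattern is List.count
lemma countGo_star (fuel : Nat) : ∀ (l : List Char) (acc : Nat), l.length ≤ fuel →
    PySem.Chars.count.go ['*'] fuel l acc = acc + l.count '*' := by
  induction fuel with
  | zero =>
    intro l acc h
    have : l = [] := List.eq_nil_of_length_eq_zero (Nat.le_zero.mp h)
    subst this; simp [PySem.Chars.count.go]
  | succ n ih =>
    intro l acc h
    cases l with
    | nil => simp [PySem.Chars.count.go]
    | cons c t =>
      simp only [PySem.Chars.count.go, List.isPrefixOf]
      by_cases hc : c = '*'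
      · subst hc
        simp only [BEq.rfl, Bool.true_and, if_true]
        simp only [List.length_singleton, List.drop_succ_cons, List.drop_zero]
        rw [ih t (acc + 1) (by simpa using h)]
        simp
        omega
      · rw [if_neg (by simp [beq_iff_eq]; exact fun h' => hc h'.symm)]
        rw [ih t acc (by simpa using h)]
        simp [hc]

lemma count_star (l : List Char) : PySem.Chars.count l ['*'] = l.count '*' := by
  simpa [PySem.Chars.count] using countGo_star l.length l 0 le_rfl

-- find.go on a list without '*' returns -1
lemma findGo_star_none : ∀ (l : List Char) (k : Nat), '*' ∉ l →
    PySem.Chars.find.go ['*'] l k = -1 := by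
  intro l
  induction l with
  | nil => intro k _; simp [PySem.Chars.find.go]
  | cons c t ih =>
    intro k h
    simp only [PySem.Chars.find.go, List.isPrefixOf]
    have hc : c ≠ '*' := fun h' => h (h' ▸ List.mem_cons_self ..)
    rw [if_neg (by simp [beq_iff_eq]; exact fun h' => hc h'.symm)]
    exact ih (k + 1) (fun hm => h (List.mem_cons_of_mem _ hm))

-- find.go at the first occurrence
lemma findGo_star_first : ∀ (p : List Char) (q : List Char) (k : Nat), '*' ∉ p →
    PySem.Chars.find.go ['*'] (p ++ '*' :: q) k = (k : Int) + p.length := by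
  intro p
  induction p with
  | nil =>
    intro q k _
    simp [PySem.Chars.find.go, List.isPrefixOf]
  | cons c t ih =>
    intro q k h
    simp only [List.cons_append, PySem.Chars.find.go, List.isPrefixOf]
    have hc : c ≠ '*' := fun h' => h (h' ▸ List.mem_cons_self ..)
    rw [if_neg (by simp [beq_iff_eq]; exact fun h' => hc h'.symm)]
    rw [ih q (k + 1) (fun hm => h (List.mem_cons_of_mem _ hm))]
    simp; omega

-- replace.go deleting a single char is List.filter
lemma replaceGo_star (fuel : Nat) : ∀ (l acc : List Char), l.length ≤ fuel →
    PySem.Chars.replace.go ['*'] [] fuel l acc = acc.reverse ++ l.filter (· ≠ '*') := by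
  induction fuel with
  | zero =>
    intro l acc h
    have : l = [] := List.eq_nil_of_length_eq_zero (Nat.le_zero.mp h)
    subst this; simp [PySem.Chars.replace.go]
  | succ n ih =>
    intro l acc h
    cases l with
    | nil => simp [PySem.Chars.replace.go]
    | cons c t =>
      simp only [PySem.Chars.replace.go, List.isPrefixOf]
      by_cases hc : c = '*'
      · subst hc
        simp only [BEq.rfl, Bool.true_and, if_true]
        simp only [List.length_singleton, List.drop_succ_cons, List.drop_zero,
          List.reverse_nil, List.nil_append]
        rw [ih t acc (by simpa using h)]
        simp
      · rw [if_neg (by simp [beq_iff_eq]; exact fun h' => hc h'.symm)]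
        rw [ih t (c :: acc) (by simpa using h)]
        simp [hc]

lemma replace_star (l : List Char) :
    PySem.Chars.replace l ['*'] [] = l.filter (· ≠ '*') := by
  simpa [PySem.Chars.replace] using replaceGo_star l.length l [] le_rfl

-- A's loop once the wildcard has been consumed: it filters the rest
lemma foldl_stepA_false (l : List Char) : ∀ (acc : List Char),
    l.foldl stepA (false, acc) = (false, acc ++ l.filter (· ≠ '*')) := by
  induction l with
  | nil => simp
  | cons c t ih =>
    intro acc
    by_cases hc : c = '*'
    · subst hc
      rw [List.foldl_cons, show stepA (false, acc) '*' = (false, acc) from by simp [stepA],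
        ih acc]
      simp
    · rw [List.foldl_cons, show stepA (false, acc) c = (false, acc ++ [c]) from by
        simp [stepA, hc], ih (acc ++ [c])]
      simp [hc]

-- A's loop before the first '*': it copies
lemma foldl_stepA_true (p : List Char) : ∀ (acc : List Char), '*' ∉ p →
    p.foldl stepA (true, acc) = (true, acc ++ p) := by
  induction p with
  | nil => simp
  | cons c t ih =>
    intro acc h
    have hc : c ≠ '*' := fun h' => h (h' ▸ List.mem_cons_self ..)
    rw [List.foldl_cons, show stepA (true, acc) c = (true, acc ++ [c]) from by
      simp [stepA, hc], ih (acc ++ [c]) (fun hm => h (List.mem_cons_of_mem _ hm))]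
    simp

-- first-occurrence decomposition
lemma first_star (l : List Char) (h : '*' ∈ l) :
    ∃ p q, l = p ++ '*' :: q ∧ '*' ∉ p := by
  induction l with
  | nil => cases h
  | cons c t ih =>
    by_cases hc : c = '*'
    · exact ⟨[], t, by simp [hc], by simp⟩
    · have ht : '*' ∈ t := by
        rcases List.mem_cons.mp h with h' | h'
        · exact absurd h'.symm hc
        · exact h'
      obtain ⟨p, q, rfl, hp⟩ := ih ht
      exact ⟨c :: p, q, rfl, by simp [hp]; exact fun h' => hc h'.symm⟩

-- the whole equivalence, for every string (the Dom hypothesis is not needed)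
lemma clean_eq (s : String) : clean_wildcard_term s = clean_wildcard_term_alt s := by
  unfold clean_wildcard_term clean_wildcard_term_alt
  simp only [PySem.Str.count, PySem.Str.find, PySem.Str.slice, PySem.Str.replace,
    String.toList_ofList]
  rw [show ("*" : String).toList = ['*'] from rfl, count_star]
  by_cases h : '*' ∈ (PySem.Str.lower s).toList
  · obtain ⟨p, r, hl, hp⟩ := first_star _ h
    rw [hl]
    rw [show PySem.Chars.find (p ++ '*' :: r) ['*'] = (p.length : Int) from by
      simpa [PySem.Chars.find] using findGo_star_first p r 0 hp]
    rw [if_neg (by omega : ((p.length : Int)) ≠ -1)]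
    have hcast : ((p.length : Int) + 1) = ((p.length + 1 : Nat) : Int) := by push_cast; ring
    have hslice1 : PySem.Chars.slice (p ++ '*' :: r) none (some ((p.length : Int) + 1))
        = p ++ ['*'] := by
      rw [hcast, PySem.Chars.slice_eq_listSlice, PySem.List.slice_to_natCast]
      simp [List.take_append]
    have hslice2 : PySem.Chars.slice (p ++ '*' :: r) (some ((p.length : Int) + 1)) none
        = r := by
      rw [hcast, PySem.Chars.slice_eq_listSlice, PySem.List.slice_from_natCast]
      simp [List.drop_append]
    rw [hslice1, hslice2]
    have hpcount : p.count '*' = 0 := List.count_eq_zero.mpr hp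
    by_cases hr : '*' ∈ r
    · have hrc : 0 < r.count '*' := List.count_pos_iff.mpr hr
      rw [if_pos (by simp [List.count_append]; omega)]
      rw [List.foldl_append, foldl_stepA_true p [] hp]
      simp only [List.nil_append, List.foldl_cons]
      rw [show stepA (true, p) '*' = (false, p ++ ['*']) from by simp [stepA],
        foldl_stepA_false r (p ++ ['*'])]
      rw [show ("" : String).toList = ([] : List Char) from rfl, replace_star]
    · have hrc : r.count '*' = 0 := List.count_eq_zero.mpr hr
      rw [if_neg (by simp [List.count_append]; omega)]
      rw [show ("" : String).toList = ([] : List Char) from rfl, replace_star]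
      have hfr : r.filter (· ≠ '*') = r := List.filter_eq_self.mpr (by
        intro a ha; simp; exact fun h' => hr (h' ▸ ha))
      rw [hfr, show p ++ ['*'] ++ r = p ++ '*' :: r from by simp, ← hl,
        String.ofList_toList]
  · have hc0 : (PySem.Str.lower s).toList.count '*' = 0 := List.count_eq_zero.mpr h
    rw [if_neg (by omega)]
    rw [show PySem.Chars.find (PySem.Str.lower s).toList ['*'] = -1 from by
      simpa [PySem.Chars.find] using findGo_star_none _ 0 h]
    rw [if_pos rfl]

-- ===== VERDICT (by name: the statement is the Claim_ definition above) =====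
theorem clean_wildcard_term_spec : Claim_equal_clean_wildcard_term := by
  intro q _
  unfold Spec_clean_wildcard_term
  exact clean_eq q
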